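-- pv_equiv track=rewrite | github.com/peteromallet/desloppify | desloppify/lang/python/detectors/layer_violation.py | _forbidden_matches_module
-- ===== SOURCE A (Python) =====
-- def _forbidden_matches_module(module_path: str, forbidden: str) -> bool:
--     """Component-aware forbidden import match."""
--     parts = [p for p in module_path.split("/") if p]
--     forbidden_parts = [p for p in forbidden.strip("/").split("/") if p]
--     if not parts or not forbidden_parts:
--         return False
--     width = len(forbidden_parts)
--     for idx in range(len(parts) - width + 1):
--         if parts[idx:idx + width] == forbidden_parts:
--             return True
--     return False
-- ===== SOURCE B (Python) =====
-- def _forbidden_matches_module(module_path: str, forbidden: str) -> bool: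
--     parts = [p for p in module_path.split("/") if p]
--     forbidden_parts = [p for p in forbidden.strip("/").split("/") if p]
--     if not parts or not forbidden_parts:
--         return False
--     haystack = "/".join([""] + parts + [""])
--     needle = "/".join([""] + forbidden_parts + [""])
--     return needle in haystack
-- ===== Notes on version B (the rewrite author's own statement) =====
-- stated objective: idiomatic
-- what changed: Replaces the explicit sliding-window loop comparing list slices by joining the components into slash-delimited strings ('/'+'/'.join(parts)+'/') and doing a single substring test, the boundary slashes ensuring only whole contiguous components match.
import Mathlib
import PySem

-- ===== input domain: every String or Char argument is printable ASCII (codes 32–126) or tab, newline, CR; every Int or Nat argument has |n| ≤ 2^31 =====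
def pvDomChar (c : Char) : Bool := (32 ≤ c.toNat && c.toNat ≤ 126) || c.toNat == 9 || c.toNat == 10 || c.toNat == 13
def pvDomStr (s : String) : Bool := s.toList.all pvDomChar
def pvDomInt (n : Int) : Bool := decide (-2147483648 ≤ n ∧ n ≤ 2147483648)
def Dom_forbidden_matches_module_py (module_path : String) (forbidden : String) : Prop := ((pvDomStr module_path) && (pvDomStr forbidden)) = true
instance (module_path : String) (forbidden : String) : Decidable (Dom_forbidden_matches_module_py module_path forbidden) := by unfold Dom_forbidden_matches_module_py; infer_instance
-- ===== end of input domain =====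

-- B replaces A's sliding-window slice comparison by one substring test on
-- slash-delimited strings ('/'+'/'.join(parts)+'/'); objective: idiomatic.

-- ===== PORT A =====
def forbidden_matches_module_py (module_path : String) (forbidden : String) : Bool :=
  let parts := (PySem.Chars.splitOn module_path.toList ['/']).filter (· ≠ [])
  let fparts := (PySem.Chars.splitOn (PySem.Chars.stripChars forbidden.toList ['/']) ['/']).filter (· ≠ [])
  if parts = [] ∨ fparts = [] then false
  else
    let width : Int := fparts.length
    (PySem.List.pyRange 0 ((parts.length : Int) - width + 1) 1).any
      (fun idx => PySem.List.slice parts (some idx) (some (idx + width)) == fparts)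

-- ===== PORT B =====
def forbidden_matches_module_py_alt (module_path : String) (forbidden : String) : Bool :=
  let parts := (PySem.Chars.splitOn module_path.toList ['/']).filter (· ≠ [])
  let fparts := (PySem.Chars.splitOn (PySem.Chars.stripChars forbidden.toList ['/']) ['/']).filter (· ≠ [])
  if parts = [] ∨ fparts = [] then false
  else
    let haystack := PySem.Chars.join ['/'] ([[]] ++ parts ++ [[]])
    let needle := PySem.Chars.join ['/'] ([[]] ++ fparts ++ [[]])
    PySem.Chars.isIn needle haystack

-- ===== PRECONDITION & SPEC =====
def Spec_forbidden_matches_module_py (module_path : String) (forbidden : String) (out : Bool) : Prop := out = forbidden_matches_module_py_alt module_path forbidden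
instance (module_path : String) (forbidden : String) (out : Bool) : Decidable (Spec_forbidden_matches_module_py module_path forbidden out) := by unfold Spec_forbidden_matches_module_py; infer_instance

-- ===== CLAIM (what is proved, stated in full; the proofs are below) =====
def Claim_equal_forbidden_matches_module_py : Prop := ∀ (module_path : String) (forbidden : String), Dom_forbidden_matches_module_py module_path forbidden → Spec_forbidden_matches_module_py module_path forbidden (forbidden_matches_module_py module_path forbidden)

-- ===== LEMMAS AND PROOFS =====

/-- `pvTl xs` is the tail of the slash-delimited encoding: `'/' :: pvTl xs = "/" ++ "/".join(xs) ++ "/"`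
    when every component is taken literally. -/
def pvTl : List (List Char) → List Char
  | [] => []
  | p :: ps => p ++ '/' :: pvTl ps

lemma pvTl_append (a b : List (List Char)) : pvTl (a ++ b) = pvTl a ++ pvTl b := by
  induction a with
  | nil => simp [pvTl]
  | cons p ps ih => simp [pvTl, ih]

lemma pvTl_form (l : List (List Char)) : l = [] ∨ ∃ t, pvTl l = t ++ ['/'] := by
  induction l with
  | nil => exact Or.inl rfl
  | cons p ps ih =>
    refine Or.inr ?_
    rcases ih with h | ⟨t, ht⟩
    · subst h; exact ⟨p, by simp [pvTl]⟩
    · exact ⟨p ++ '/' :: t, by simp [pvTl, ht]⟩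

lemma pv_intercalate (xs : List (List Char)) :
    ['/'].intercalate (xs ++ [[]]) = pvTl xs := by
  induction xs with
  | nil => simp [List.intercalate, pvTl]
  | cons p ps ih =>
    have step : ['/'].intercalate ((p :: ps) ++ [[]]) = p ++ '/' :: ['/'].intercalate (ps ++ [[]]) := by
      cases ps <;> simp [List.intercalate, List.intersperse]
    rw [step, ih]; rfl

lemma pv_join_eq (xs : List (List Char)) :
    PySem.Chars.join ['/'] ([[]] ++ xs ++ [[]]) = '/' :: pvTl xs := by
  have step : ['/'].intercalate (([] :: (xs ++ [[]]))) = [] ++ '/' :: ['/'].intercalate (xs ++ [[]]) := by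
    cases xs <;> simp [List.intercalate, List.intersperse]
  show ['/'].intercalate ([[]] ++ xs ++ [[]]) = _
  rw [show ([[]] ++ xs ++ [[]] : List (List Char)) = [] :: (xs ++ [[]]) by simp, step, pv_intercalate]
  rfl

/-- pieces produced by splitOn.go with separator "/" contain no '/'. -/
lemma pv_go_no_slash : ∀ (fuel : Nat) (l cur : List Char) (acc : List (List Char)),
    l.length ≤ fuel → '/' ∉ cur → (∀ p ∈ acc, '/' ∉ p) →
    ∀ p ∈ PySem.Chars.splitOn.go ['/'] fuel l cur acc, '/' ∉ p := by
  intro fuel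
  induction fuel with
  | zero =>
    intro l cur acc hl hcur hacc p hp
    have hl0 : l = [] := List.eq_nil_of_length_eq_zero (Nat.le_zero.mp hl)
    subst hl0
    simp [PySem.Chars.splitOn.go] at hp
    rcases hp with h | h
    · exact hacc p h
    · subst h; simpa using hcur
  | succ n ih =>
    intro l cur acc hl hcur hacc p hp
    cases l with
    | nil =>
      simp [PySem.Chars.splitOn.go] at hp
      rcases hp with h | h
      · exact hacc p h
      · subst h; simpa using hcur
    | cons c rest =>
      by_cases hc : c = '/'
      · subst hc
        rw [show PySem.Chars.splitOn.go ['/'] (n+1) ('/' :: rest) cur acc =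
            PySem.Chars.splitOn.go ['/'] n rest [] (cur.reverse :: acc) by
          simp [PySem.Chars.splitOn.go, List.isPrefixOf]] at hp
        refine ih rest [] (cur.reverse :: acc) (by simpa using hl) (by simp) ?_ p hp
        intro q hq
        rcases List.mem_cons.mp hq with h | h
        · subst h; simpa using hcur
        · exact hacc q h
      · rw [show PySem.Chars.splitOn.go ['/'] (n+1) (c :: rest) cur acc =
            PySem.Chars.splitOn.go ['/'] n rest (c :: cur) acc by
          simp only [PySem.Chars.splitOn.go, List.isPrefixOf]
          rw [if_neg (by simp [Ne.symm hc])]] at hp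
        refine ih rest (c :: cur) acc (by simpa using hl) ?_ hacc p hp
        intro h
        rcases List.mem_cons.mp h with h | h
        · exact hc h.symm
        · exact hcur h

lemma pv_splitOn_no_slash (s : List Char) : ∀ p ∈ PySem.Chars.splitOn s ['/'], '/' ∉ p := by
  intro p hp
  exact pv_go_no_slash (s.length + 1) s [] [] (by omega) (by simp) (by simp) p hp

lemma pv_cancel (f : List Char) : ∀ (p X Y : List Char), '/' ∉ f → '/' ∉ p →
    f ++ '/' :: X <+: p ++ '/' :: Y → f = p ∧ X <+: Y := by
  induction f with
  | nil =>
    intro p X Y _ hp h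
    cases p with
    | nil => simpa using h
    | cons d p' =>
      exfalso
      simp only [List.nil_append, List.cons_append, List.cons_prefix_cons] at h
      exact hp (by simp [← h.1])
  | cons c f' ih =>
    intro p X Y hf hp h
    cases p with
    | nil =>
      exfalso
      simp only [List.cons_append, List.nil_append, List.cons_prefix_cons] at h
      exact hf (by simp [h.1])
    | cons d p' =>
      simp only [List.cons_append, List.cons_prefix_cons] at h
      obtain ⟨h1, h2⟩ := h
      have := ih p' X Y (fun hm => hf (List.mem_cons_of_mem _ hm)) (fun hm => hp (List.mem_cons_of_mem _ hm)) h2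
      exact ⟨by rw [h1, this.1], this.2⟩

lemma pv_prefix (F : List (List Char)) : ∀ (P : List (List Char)),
    (∀ p ∈ F, '/' ∉ p) → (∀ p ∈ P, '/' ∉ p) →
    pvTl F <+: pvTl P → F <+: P := by
  induction F with
  | nil => intro P _ _ _; exact List.nil_prefix
  | cons f fs ih =>
    intro P hF hP h
    cases P with
    | nil =>
      exfalso
      have : pvTl (f :: fs) = [] := List.prefix_nil.mp (by simpa [pvTl] using h)
      simp [pvTl] at this
    | cons p ps =>
      simp only [pvTl] at h
      obtain ⟨h1, h2⟩ := pv_cancel f p (pvTl fs) (pvTl ps)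
        (hF f (by simp)) (hP p (by simp)) h
      have := ih ps (fun q hq => hF q (List.mem_cons_of_mem _ hq))
        (fun q hq => hP q (List.mem_cons_of_mem _ hq)) h2
      subst h1
      exact (List.prefix_cons_inj f).mpr this

lemma pv_shift (p : List Char) : ∀ (X Y : List Char), '/' ∉ p →
    ('/' :: X <:+: p ++ '/' :: Y) → ('/' :: X <:+: '/' :: Y) := by
  induction p with
  | nil => intro X Y _ h; simpa using h
  | cons c p' ih =>
    intro X Y hp h
    rcases List.infix_cons_iff.mp (by simp at h; exact h) with h | h
    · exfalso
      simp only [List.cons_prefix_cons] at h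
      exact hp (by simp [← h.1])
    · exact ih X Y (fun hm => hp (List.mem_cons_of_mem _ hm)) h

lemma pv_inf_iff (F P : List (List Char))
    (hF : ∀ p ∈ F, '/' ∉ p) (hP : ∀ p ∈ P, '/' ∉ p) :
    ('/' :: pvTl F <:+: '/' :: pvTl P) ↔ F <:+: P := by
  constructor
  · intro h
    induction P with
    | nil =>
      rcases List.infix_cons_iff.mp h with h | h
      · exact (pv_prefix F [] hF hP (by simp at h; exact h)).isInfix
      · simp [pvTl] at h
    | cons p ps ihP =>
      rcases List.infix_cons_iff.mp h with h' | h'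
      · exact (pv_prefix F (p :: ps) hF hP (by simpa using h')).isInfix
      · have h2 : '/' :: pvTl F <:+: '/' :: pvTl ps :=
          pv_shift p (pvTl F) (pvTl ps) (hP p (by simp)) (by simp only [pvTl] at h'; exact h')
        have := ihP (fun q hq => hP q (List.mem_cons_of_mem _ hq)) h2
        exact List.infix_cons this
  · rintro ⟨l, r, rfl⟩
    rcases pvTl_form l with hl | ⟨t, ht⟩
    · subst hl
      refine ⟨[], pvTl r, ?_⟩
      rcases pvTl_form F with hF0 | ⟨u, hu⟩
      · subst hF0; simp [pvTl]
      · simp [pvTl_append]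
    · refine ⟨'/' :: t, pvTl r, ?_⟩
      simp [pvTl_append, ht]

lemma pv_slice_window (P F : List (List Char)) :
    ((PySem.List.pyRange 0 ((P.length : Int) - (F.length : Int) + 1) 1).any
      (fun idx => PySem.List.slice P (some idx) (some (idx + (F.length : Int))) == F))
    = decide (F <:+: P) := by
  by_cases h : F <:+: P
  · simp only [h, decide_true]
    rcases h with ⟨l, r, rfl⟩
    rw [List.any_eq_true]
    refine ⟨(l.length : Int), ?_, ?_⟩
    · rw [PySem.List.mem_pyRange_one]
      constructor
      · exact_mod_cast Int.natCast_nonneg l.length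
      · simp only [List.length_append]
        push_cast
        omega
    · have heq : PySem.List.slice (l ++ (F ++ r)) (some (l.length : Int))
          (some ((l.length : Int) + (F.length : Int))) = F := by
        rw [PySem.List.slice_natCast_add, List.drop_left, List.take_left]
      rw [List.append_assoc, heq]
      exact BEq.rfl
  · simp only [h, decide_false]
    rw [List.any_eq_false]
    intro idx hidx
    rw [PySem.List.mem_pyRange_one] at hidx
    obtain ⟨h0, h1⟩ := hidx
    intro hcontra
    apply h
    have hslice := of_decide_eq_true (by simpa using hcontra)
    rw [PySem.List.slice_toNat P h0 (by positivity)] at hslice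
    have hn : ((idx + (F.length : Int)).toNat - idx.toNat) = F.length := by omega
    rw [hn] at hslice
    refine ⟨P.take idx.toNat, (P.drop idx.toNat).drop F.length, ?_⟩
    conv_rhs => rw [← List.take_append_drop idx.toNat P]
    rw [List.append_assoc]
    congr 1
    nth_rewrite 1 [← hslice]
    exact List.take_append_drop F.length (P.drop idx.toNat)

-- ===== VERDICT (by name: the statement is the Claim_ definition above) =====
theorem forbidden_matches_module_py_spec : Claim_equal_forbidden_matches_module_py := by
  intro module_path forbidden _
  unfold Spec_forbidden_matches_module_py
  unfold forbidden_matches_module_py forbidden_matches_module_py_alt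
  set parts := (PySem.Chars.splitOn module_path.toList ['/']).filter (· ≠ []) with hparts
  set fparts := (PySem.Chars.splitOn (PySem.Chars.stripChars forbidden.toList ['/']) ['/']).filter (· ≠ []) with hfparts
  by_cases hemp : parts = [] ∨ fparts = []
  · simp [hemp]
  · simp only [hemp, if_false]
    have hPns : ∀ p ∈ parts, '/' ∉ p := by
      intro p hp
      exact pv_splitOn_no_slash _ p (List.mem_of_mem_filter hp)
    have hFns : ∀ p ∈ fparts, '/' ∉ p := by
      intro p hp
      exact pv_splitOn_no_slash _ p (List.mem_of_mem_filter hp)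
    rw [pv_slice_window parts fparts]
    rw [pv_join_eq parts, pv_join_eq fparts]
    rw [show PySem.Chars.isIn ('/' :: pvTl fparts) ('/' :: pvTl parts)
        = decide ('/' :: pvTl fparts <:+: '/' :: pvTl parts) by
      by_cases hin : '/' :: pvTl fparts <:+: '/' :: pvTl parts
      · simp [hin, (PySem.Chars.isIn_iff_infix _ _).mpr hin]
      · simp [hin, (PySem.Chars.isIn_eq_false_iff _ _).mpr hin]]
    rw [decide_eq_decide]
    exact (pv_inf_iff fparts parts hFns hPns).symm
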